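-- pv_equiv track=rewrite | github.com/carsonmit/StackSortingPermutations | StackSort.py | stacksort
-- ===== SOURCE A (Python) =====
-- def stacksort(p):  # Stack sorting algorithm on a given permutation p (as a list)
--     stack = [p[0]]  # Immediately initializes a stack and pushes first element of p
--     n = len(p)
--     s = []  # Initializes output of the stack
--     for i in range(n - 1):  # Iterate over the 2nd through nth elements of p
--         while stack != [] and p[i + 1] > stack[-1]:  # While nonempty and input > top of stack:
--             s.append(stack.pop())  # Pop the top of the stack
--         stack.append(p[i + 1])  # Once the stack is empty or input < top, push input
--     while stack:  # Clear the rest of the stack once last element is pushed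
--         s.append(stack.pop())
--     return s
-- ===== SOURCE B (Python) =====
-- def stacksort(p):
--     n = len(p)
--     nge = [n] * n  # nge[i]: index of the first later element strictly greater than p[i], else n
--     for i in range(n - 2, -1, -1):
--         j = i + 1
--         while j < n and p[j] <= p[i]:
--             j = nge[j]
--         nge[i] = j
--     # p[i] is emitted exactly when element nge[i] arrives (or at the end); later positions first
--     buckets = [[] for _ in range(n + 1)]
--     for i in range(n - 1, -1, -1):
--         buckets[nge[i]].append(p[i])
--     return [x for b in buckets for x in b]
-- ===== Notes on version B (the rewrite author's own statement) =====
-- stated objective: alternative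
-- what changed: Replaces the left-to-right stack simulation by a two-phase algorithm: compute each element's next-strictly-greater index by backward chain-jumping, then bucket elements by that trigger index and concatenate the buckets.
import Mathlib
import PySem

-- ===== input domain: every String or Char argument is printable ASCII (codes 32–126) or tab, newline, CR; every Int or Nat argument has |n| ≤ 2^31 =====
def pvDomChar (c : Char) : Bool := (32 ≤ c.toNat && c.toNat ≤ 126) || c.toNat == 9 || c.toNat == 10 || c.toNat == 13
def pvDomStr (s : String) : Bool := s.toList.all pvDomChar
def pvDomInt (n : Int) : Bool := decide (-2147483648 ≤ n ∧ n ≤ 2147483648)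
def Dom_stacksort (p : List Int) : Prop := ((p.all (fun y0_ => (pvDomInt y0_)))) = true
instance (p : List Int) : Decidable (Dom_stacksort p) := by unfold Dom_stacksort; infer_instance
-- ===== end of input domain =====

-- B replaces A's left-to-right stack simulation by a two-phase algorithm (next-strictly-greater
-- indices by backward chain-jumping, then bucketing by trigger index); return values are proved
-- equal on nonempty lists (A raises IndexError on []).

-- ===== PORT A =====
-- the inner 'while stack != [] and x > stack[-1]' loop: returns (remaining stack, popped elements
-- in pop order); the stack is held top-first
def popA (x : Int) : List Int → List Int × List Int
  | [] => ([], [])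
  | t :: rest =>
    if x > t then
      let r := popA x rest
      (r.1, t :: r.2)
    else (t :: rest, [])

-- the 'for i in range(n-1)' loop over the remaining input: returns (appended output, final stack)
def runA : List Int → List Int → List Int × List Int
  | [], stack => ([], stack)
  | x :: xs, stack =>
    let r := popA x stack
    let rest := runA xs (x :: r.1)
    (r.2 ++ rest.1, rest.2)

def stacksort (p : List Int) : List Int :=
  match p with
  | [] => []        -- Python raises IndexError on p[0]; excluded by Pre_stacksort
  | h :: t =>
    let r := runA t [h]
    r.1 ++ r.2      -- final 'while stack: s.append(stack.pop())'

-- ===== PORT B =====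
-- the inner 'while j < n and p[j] <= p[i]: j = nge[j]' loop; fuel p.length is enough for the
-- table the port builds (every stored jump is strictly increasing), proved in the lemmas below
def ngeChase (p : List Int) (x : Int) (table : List Nat) : Nat → Nat → Nat
  | 0, j => j
  | fuel + 1, j =>
    if j < p.length ∧ p.getD j 0 ≤ x then ngeChase p x table fuel (table.getD j 0) else j

-- 'for i in range(n-2, -1, -1)': the counter c encodes i = c-1 down to 0 (all indices in range)
def buildNge (p : List Int) : Nat → List Nat → List Nat
  | 0, table => table
  | c + 1, table => buildNge p c (table.set c (ngeChase p (p.getD c 0) table p.length (c + 1)))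

-- 'for i in range(n-1, -1, -1): buckets[nge[i]].append(p[i])'
def fillBuckets (p : List Int) (nge : List Nat) : Nat → List (List Int) → List (List Int)
  | 0, buckets => buckets
  | c + 1, buckets => fillBuckets p nge c (buckets.modify (nge.getD c 0) (· ++ [p.getD c 0]))

def stacksort_alt (p : List Int) : List Int :=
  let n := p.length
  let nge := buildNge p (n - 1) (List.replicate n n)
  let buckets := fillBuckets p nge n (List.replicate (n + 1) [])
  buckets.flatten   -- '[x for b in buckets for x in b]'

-- ===== PRECONDITION & SPEC =====
-- Pre_ excludes exactly the empty list, on which A raises IndexError (p[0]).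
def Pre_stacksort (p : List Int) : Prop := p ≠ []
instance (p : List Int) : Decidable (Pre_stacksort p) := by unfold Pre_stacksort; infer_instance
def pvWitness_stacksort : List Int := ([2, 1, 3] : List Int)

def Spec_stacksort (p : List Int) (out : List Int) : Prop := out = stacksort_alt p
instance (p : List Int) (out : List Int) : Decidable (Spec_stacksort p out) := by unfold Spec_stacksort; infer_instance

-- ===== CLAIM (what is proved, stated in full; the proofs are below) =====
def Claim_equal_stacksort : Prop := ∀ (p : List Int), Dom_stacksort p → Pre_stacksort p → Spec_stacksort p (stacksort p)

-- ===== LEMMAS AND PROOFS =====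
def findNge (p : List Int) (x : Int) (j : Nat) : Nat :=
  if h : j < p.length then (if x < p.getD j 0 then j else findNge p x (j + 1)) else p.length
termination_by p.length - j

theorem findNge_ge (p : List Int) (x : Int) (j : Nat) (hj : j ≤ p.length) : j ≤ findNge p x j := by
  fun_induction findNge with
  | case1 j h hx => exact le_refl j
  | case2 j h hx ih => exact le_trans (Nat.le_succ j) (ih h)
  | case3 j h => omega

theorem findNge_le (p : List Int) (x : Int) (j : Nat) (h : j ≤ p.length) :
    findNge p x j ≤ p.length := by
  fun_induction findNge with
  | case1 j h hx => omega
  | case2 j h hx ih => exact ih (by omega)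
  | case3 j h => omega

theorem findNge_skipped (p : List Int) (x : Int) (j k : Nat)
    (h1 : j ≤ k) (h2 : k < findNge p x j) : p.getD k 0 ≤ x := by
  fun_induction findNge with
  | case1 j h hx => omega
  | case2 j h hx ih =>
    rcases Nat.eq_or_lt_of_le h1 with rfl | hlt
    · exact not_lt.mp hx
    · exact ih hlt h2
  | case3 j h => omega

theorem findNge_hit (p : List Int) (x : Int) (j : Nat) (h : findNge p x j < p.length) :
    x < p.getD (findNge p x j) 0 := by
  fun_induction findNge with
  | case1 j hj hx => exact hx
  | case2 j hj hx ih => exact ih h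
  | case3 j hj => omega

theorem findNge_min (p : List Int) (x : Int) (j k : Nat)
    (h1 : j ≤ k) (h2 : k < p.length) (h3 : x < p.getD k 0) : findNge p x j ≤ k := by
  fun_induction findNge with
  | case1 j hj hx => exact h1
  | case2 j hj hx ih =>
    rcases Nat.eq_or_lt_of_le h1 with rfl | hlt
    · exact absurd h3 hx
    · exact ih hlt
  | case3 j hj => omega

theorem findNge_jump (p : List Int) (x : Int) (j' : Nat) (h2 : j' ≤ p.length) :
    ∀ d j, j' - j = d → j ≤ j' → (∀ k, j ≤ k → k < j' → p.getD k 0 ≤ x) →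
      findNge p x j = findNge p x j' := by
  intro d
  induction d with
  | zero =>
    intro j hd h1 h3
    have : j = j' := by omega
    rw [this]
  | succ d ih =>
    intro j hd h1 h3
    have hlt : j < j' := by omega
    have hj : j < p.length := by omega
    rw [findNge, dif_pos hj, if_neg (not_lt.mpr (h3 j le_rfl hlt))]
    exact ih (j + 1) (by omega) (by omega) (fun k hk1 hk2 => h3 k (by omega) hk2)

def sNge (p : List Int) (i : Nat) : Nat := findNge p (p.getD i 0) (i + 1)

theorem sNge_gt (p : List Int) (i : Nat) (h : i < p.length) : i < sNge p i :=
  Nat.lt_of_lt_of_le (Nat.lt_succ_self i) (findNge_ge p _ _ h)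

theorem sNge_le (p : List Int) (i : Nat) (h : i < p.length) : sNge p i ≤ p.length :=
  findNge_le p _ _ h

theorem sNge_skipped (p : List Int) (i k : Nat) (h1 : i < k) (h2 : k < sNge p i) :
    p.getD k 0 ≤ p.getD i 0 :=
  findNge_skipped p _ _ _ h1 h2

theorem sNge_hit (p : List Int) (i : Nat) (h : sNge p i < p.length) :
    p.getD i 0 < p.getD (sNge p i) 0 :=
  findNge_hit p _ _ h

theorem sNge_min (p : List Int) (i k : Nat) (h1 : i < k) (h2 : k < p.length)
    (h3 : p.getD i 0 < p.getD k 0) : sNge p i ≤ k :=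
  findNge_min p _ _ _ h1 h2 h3


theorem popA_filter (p : List Int) (t : Nat) (ht : t < p.length) :
    ∀ L : List Nat, L.Pairwise (· > ·) → (∀ i ∈ L, i < t ∧ t ≤ sNge p i) →
      popA (p.getD t 0) (L.map (fun i => p.getD i 0)) =
        ((L.filter (fun i => !(sNge p i == t))).map (fun i => p.getD i 0),
         (L.filter (fun i => sNge p i == t)).map (fun i => p.getD i 0)) := by
  intro L
  induction L with
  | nil => simp [popA]
  | cons i L ih =>
    intro hpw hmem
    obtain ⟨hit, hnge⟩ := hmem i (List.mem_cons_self)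
    by_cases hv : p.getD t 0 > p.getD i 0
    · have hEq : sNge p i = t := le_antisymm (sNge_min p i t hit ht hv) hnge
      have ihe := ih hpw.of_cons (fun i' hi' => hmem i' (List.mem_cons_of_mem _ hi'))
      simp only [List.map_cons, popA, hv, if_pos, List.filter_cons, hEq, beq_self_eq_true,
        Bool.not_true, ihe]
      simp
    · have hne : ¬ (sNge p i = t) := by
        intro hEq
        have := sNge_hit p i (by omega)
        rw [hEq] at this
        omega
      have hallL : ∀ i' ∈ L, ¬ (sNge p i' = t) := by
        intro i' hi' hEq
        have hii : i' < i := List.rel_of_pairwise_cons hpw hi'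
        have hle : p.getD i 0 ≤ p.getD i' 0 := by
          apply sNge_skipped p i' i hii
          have := (hmem i' (List.mem_cons_of_mem _ hi')).2
          omega
        have := sNge_hit p i' (by omega)
        rw [hEq] at this
        omega
      have h1 : (i :: L).filter (fun i => !(sNge p i == t)) = i :: L := by
        rw [List.filter_eq_self]
        intro a ha
        rcases List.mem_cons.mp ha with rfl | ha'
        · simp [hne]
        · simp [hallL a ha']
      have h2 : (i :: L).filter (fun i => sNge p i == t) = [] := by
        rw [List.filter_eq_nil_iff]
        intro a ha
        rcases List.mem_cons.mp ha with rfl | ha'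
        · simp [hne]
        · simp [hallL a ha']
      simp [popA, h1, h2]
      simpa [List.getD] using not_lt.mp hv


theorem runA_append (xs ys st : List Int) :
    runA (xs ++ ys) st =
      ((runA xs st).1 ++ (runA ys (runA xs st).2).1, (runA ys (runA xs st).2).2) := by
  induction xs generalizing st with
  | nil => simp [runA]
  | cons x xs ih => simp [runA, ih, List.append_assoc]

def bucket (p : List Int) (j : Nat) : List Int :=
  (((List.range p.length).filter (fun i => sNge p i == j)).reverse).map (fun i => p.getD i 0)

def stackModel (p : List Int) (t : Nat) : List Nat :=
  ((List.range t).filter (fun i => decide (t ≤ sNge p i))).reverse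

theorem stackModel_pairwise (p : List Int) (t : Nat) : (stackModel p t).Pairwise (· > ·) := by
  rw [stackModel, List.pairwise_reverse]
  exact List.Pairwise.sublist List.filter_sublist List.pairwise_lt_range

theorem stackModel_mem (p : List Int) (t : Nat) :
    ∀ i ∈ stackModel p t, i < t ∧ t ≤ sNge p i := by
  intro i hi
  rw [stackModel, List.mem_reverse, List.mem_filter] at hi
  exact ⟨List.mem_range.mp hi.1, of_decide_eq_true hi.2⟩

-- the elements popped when element t arrives are exactly bucket t
theorem popped_eq_bucket (p : List Int) (t : Nat) (ht : t < p.length) :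
    ((stackModel p t).filter (fun i => sNge p i == t)).map (fun i => p.getD i 0) = bucket p t := by
  rw [stackModel, bucket, List.filter_reverse, List.filter_filter]
  have h1 : (List.range t).filter (fun a => sNge p a == t && decide (t ≤ sNge p a)) =
      (List.range t).filter (fun i => sNge p i == t) := by
    apply List.filter_congr
    intro i _
    by_cases h : sNge p i = t <;> simp [h]
  have h2 : (List.range p.length).filter (fun i => sNge p i == t) =
      (List.range t).filter (fun i => sNge p i == t) := by
    have hsplit : p.length = t + (p.length - t) := by omega
    rw [hsplit, List.range_add, List.filter_append]
    have : (((List.range (p.length - t)).map (t + ·)).filter (fun i => sNge p i == t)) = [] := by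
      rw [List.filter_eq_nil_iff]
      intro a ha
      obtain ⟨k, hk, rfl⟩ := List.mem_map.mp ha
      have hkr := List.mem_range.mp hk
      have : t + k < sNge p (t + k) := sNge_gt p _ (by omega)
      simp only [beq_iff_eq]
      omega
    rw [this, List.append_nil]
  rw [h1, h2]

-- the remaining stack plus the pushed element t is the next stack model
theorem push_eq_stackModel (p : List Int) (t : Nat) (ht : t < p.length) :
    t :: (stackModel p t).filter (fun i => !(sNge p i == t)) = stackModel p (t + 1) := by
  rw [stackModel, stackModel, List.filter_reverse, List.filter_filter, List.range_succ,
    List.filter_append]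
  have h1 : (List.range t).filter (fun a => !(sNge p a == t) && decide (t ≤ sNge p a)) =
      (List.range t).filter (fun i => decide (t + 1 ≤ sNge p i)) := by
    apply List.filter_congr
    intro i _
    by_cases h : sNge p i = t
    · simp [h]
    · by_cases h' : t ≤ sNge p i
      · have : t + 1 ≤ sNge p i := by omega
        simp [h, h', this]
      · have : ¬ (t + 1 ≤ sNge p i) := by omega
        simp [h', this]
  have h2 : [t].filter (fun i => decide (t + 1 ≤ sNge p i)) = [t] := by
    have h3 : t + 1 ≤ sNge p t := sNge_gt p t ht
    simp [List.filter, h3]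
  rw [h1, h2, List.reverse_append]
  simp

theorem runA_invariant (p : List Int) :
    ∀ t, t ≤ p.length →
      runA (p.take t) [] =
        ((List.range t).flatMap (bucket p), (stackModel p t).map (fun i => p.getD i 0)) := by
  intro t
  induction t with
  | zero => simp [runA, stackModel]
  | succ t ih =>
    intro ht
    have ht' : t < p.length := by omega
    have htake : p.take (t + 1) = p.take t ++ [p.getD t 0] := by
      rw [List.take_add_one, List.getElem?_eq_getElem ht', List.getD_eq_getElem p 0 ht']
      rfl
    rw [htake, runA_append, ih (by omega)]
    have hpop := popA_filter p t ht' (stackModel p t) (stackModel_pairwise p t) (stackModel_mem p t)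
    have hone : runA [p.getD t 0] ((stackModel p t).map (fun i => p.getD i 0)) =
        (((stackModel p t).filter (fun i => sNge p i == t)).map (fun i => p.getD i 0),
         p.getD t 0 :: ((stackModel p t).filter (fun i => !(sNge p i == t))).map
           (fun i => p.getD i 0)) := by
      simp only [runA, hpop]
      simp
    rw [hone, popped_eq_bucket p t ht']
    simp only [Prod.mk.injEq]
    constructor
    · rw [List.range_succ, List.flatMap_append]
      simp
    · rw [show (p.getD t 0 :: ((stackModel p t).filter (fun i => !(sNge p i == t))).map
          (fun i => p.getD i 0)) = ((t :: (stackModel p t).filter (fun i => !(sNge p i == t))).map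
          (fun i => p.getD i 0)) from rfl, push_eq_stackModel p t ht']

def runF (xs st : List Int) : List Int := (runA xs st).1 ++ (runA xs st).2

theorem runF_buckets (p : List Int) :
    runF p [] = (List.range (p.length + 1)).flatMap (bucket p) := by
  have h := runA_invariant p p.length le_rfl
  rw [List.take_length] at h
  rw [runF, h]
  have hstack : (stackModel p p.length).map (fun i => p.getD i 0) = bucket p p.length := by
    rw [stackModel, bucket]
    congr 2
    apply List.filter_congr
    intro i hi
    have hi' := List.mem_range.mp hi
    have h1 := sNge_le p i hi'
    by_cases h : sNge p i = p.length
    · simp [h]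
    · have : ¬ (p.length ≤ sNge p i) := by omega
      simp [h, this]
  rw [hstack, List.range_succ, List.flatMap_append]
  simp




theorem ngeChase_eq (p : List Int) (x : Int) (table : List Nat) :
    ∀ fuel j, j ≤ p.length → p.length - j < fuel →
      (∀ k, j ≤ k → k < p.length → table.getD k 0 = sNge p k) →
      ngeChase p x table fuel j = findNge p x j := by
  intro fuel
  induction fuel with
  | zero => intro j hj hf _; omega
  | succ fuel ih =>
    intro j hj hf htab
    by_cases hc : j < p.length ∧ p.getD j 0 ≤ x
    · rw [ngeChase, if_pos hc, htab j le_rfl hc.1]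
      have hjn := hc.1
      have hgt : j + 1 ≤ sNge p j := sNge_gt p j hjn
      have hle : sNge p j ≤ p.length := sNge_le p j hjn
      have hstep : findNge p x j = findNge p x (sNge p j) := by
        rw [findNge, dif_pos hjn, if_neg (not_lt.mpr hc.2)]
        exact findNge_jump p x (sNge p j) hle (sNge p j - (j + 1)) (j + 1) rfl hgt
          (fun k hk1 hk2 => le_trans (sNge_skipped p j k (by omega) hk2) hc.2)
      rw [hstep]
      exact ih (sNge p j) hle (by omega) (fun k hk1 hk2 => htab k (by omega) hk2)
    · rw [ngeChase, if_neg hc]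
      by_cases hjn : j < p.length
      · have hx : x < p.getD j 0 := by
          by_contra hxx
          exact hc ⟨hjn, not_lt.mp hxx⟩
        rw [findNge, dif_pos hjn, if_pos hx]
      · rw [findNge, dif_neg hjn]
        omega

theorem buildNge_inv (p : List Int) :
    ∀ c, c ≤ p.length → ∀ table : List Nat, table.length = p.length →
      (∀ k, c ≤ k → k < p.length → table.getD k 0 = sNge p k) →
      (buildNge p c table).length = p.length ∧
        ∀ k, k < p.length → (buildNge p c table).getD k 0 = sNge p k := by
  intro c
  induction c with
  | zero =>
    intro _ table hlen htab
    exact ⟨hlen, fun k hk => htab k (Nat.zero_le k) hk⟩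
  | succ c ih =>
    intro hc table hlen htab
    have hcn : c < p.length := by omega
    have hchase : ngeChase p (p.getD c 0) table p.length (c + 1) = sNge p c := by
      rw [sNge]
      exact ngeChase_eq p _ table p.length (c + 1) (by omega) (by omega)
        (fun k hk1 hk2 => htab k (by omega) hk2)
    rw [buildNge]
    apply ih (by omega)
    · simp [hlen]
    · intro k hk1 hk2
      rcases Nat.eq_or_lt_of_le hk1 with rfl | hk
      · rw [List.getD, List.getElem?_set_self (by omega), hchase]
        rfl
      · rw [List.getD, List.getElem?_set_ne (by omega)]
        exact htab k (by omega) hk2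

theorem fillBuckets_inv (p : List Int) (ngeL : List Nat)
    (hnge : ∀ k, k < p.length → ngeL.getD k 0 = sNge p k) :
    ∀ c, c ≤ p.length → ∀ buckets : List (List Int), buckets.length = p.length + 1 →
      (fillBuckets p ngeL c buckets).length = p.length + 1 ∧
        ∀ j, j ≤ p.length →
          (fillBuckets p ngeL c buckets).getD j [] =
            buckets.getD j [] ++
              (((List.range c).filter (fun i => sNge p i == j)).reverse).map
                (fun i => p.getD i 0) := by
  intro c
  induction c with
  | zero =>
    intro _ buckets hlen
    refine ⟨hlen, fun j hj => by simp [fillBuckets]⟩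
  | succ c ih =>
    intro hc buckets hlen
    have hcn : c < p.length := by omega
    have hidx : ngeL.getD c 0 = sNge p c := hnge c hcn
    have hsle : sNge p c ≤ p.length := sNge_le p c hcn
    rw [fillBuckets, hidx]
    obtain ⟨rlen, rget⟩ := ih (by omega) (buckets.modify (sNge p c) (· ++ [p.getD c 0]))
      (by simp [hlen])
    refine ⟨rlen, fun j hj => ?_⟩
    rw [rget j hj]
    have hmod : (buckets.modify (sNge p c) (· ++ [p.getD c 0])).getD j [] =
        if sNge p c = j then buckets.getD j [] ++ [p.getD c 0] else buckets.getD j [] := by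
      have hjlt : j < buckets.length := by omega
      rw [List.getD_eq_getElem _ _ (by simp [hlen]; omega), List.getD_eq_getElem _ _ hjlt]
      rw [List.getElem_modify]
    rw [List.range_succ, List.filter_append]
    by_cases hj' : sNge p c = j
    · rw [hmod, if_pos hj']
      have hb : (sNge p c == j) = true := by simp [hj']
      have : [c].filter (fun i => sNge p i == j) = [c] := by simp [List.filter, hb]
      rw [this, List.reverse_append]
      simp
    · rw [hmod, if_neg hj']
      have hb : (sNge p c == j) = false := by simp [hj']
      have : [c].filter (fun i => sNge p i == j) = [] := by simp [List.filter, hb]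
      rw [this, List.append_nil]


theorem findNge_end (p : List Int) (x : Int) : findNge p x p.length = p.length := by
  rw [findNge]
  simp

theorem stacksort_alt_buckets (p : List Int) :
    stacksort_alt p = (List.range (p.length + 1)).flatMap (bucket p) := by
  obtain ⟨nlen, nget⟩ := buildNge_inv p (p.length - 1) (by omega)
    (List.replicate p.length p.length) (by simp)
    (by
      intro k hk1 hk2
      have hk : k = p.length - 1 := by omega
      subst hk
      rw [List.getD_eq_getElem _ _ (by simp; omega), List.getElem_replicate]
      rw [sNge, show p.length - 1 + 1 = p.length from by omega, findNge_end])
  obtain ⟨blen, bget⟩ := fillBuckets_inv p _ nget p.length le_rfl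
    (List.replicate (p.length + 1) []) (by simp)
  have hbuckets : fillBuckets p (buildNge p (p.length - 1)
      (List.replicate p.length p.length)) p.length (List.replicate (p.length + 1) []) =
      (List.range (p.length + 1)).map (bucket p) := by
    apply List.ext_getElem
    · simp [blen]
    · intro i h1 h2
      rw [← List.getD_eq_getElem _ [] h1]
      rw [bget i (by simp [blen] at h1; omega)]
      simp [bucket]
  rw [stacksort_alt]
  simp only [hbuckets]
  rw [List.flatMap_def]

theorem stacksort_eq_runF (p : List Int) (hp : p ≠ []) : stacksort p = runF p [] := by
  cases p with
  | nil => exact absurd rfl hp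
  | cons h t => simp [stacksort, runF, runA, popA]

-- ===== VERDICT (by name: the statement is the Claim_ definition above) =====
theorem stacksort_spec : Claim_equal_stacksort := by
  intro p _ hpre
  unfold Spec_stacksort
  rw [stacksort_eq_runF p hpre, runF_buckets, stacksort_alt_buckets]
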